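-- pv_equiv track=rewrite | github.com/liskarovh/IFJ-2025-2026-Compiler | test/python/test_metamorphic.py | inject_line_comments
-- ===== SOURCE A (Python) =====
-- def inject_line_comments(source: str) -> str:
--     """Vkládá // komentář pouze na whitespace-only řádky (sémanticky neutrální)."""
--     out, i = [], 0
--     in_str = in_ml = False; block = 0
--     seen_nonws_on_line = False  # od posledního EOL jsme viděli neterminální znak?
--
--     while i < len(source):
--         ch = source[i]; nxt = source[i:i+2]
--
--         # EOL – reset příznaku a případná injekce komentáře
--         if ch in ('\r', '\n'):
--             if not seen_nonws_on_line:
--                 # vlož //c těsně před EOL a zachovej typ EOL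
--                 if ch == '\r' and i + 1 < len(source) and source[i+1] == '\n':
--                     out.append(' //c \r\n'); i += 2
--                 else:
--                     out.append(' //c \n'); i += 1
--             else:
--                 if ch == '\r' and i + 1 < len(source) and source[i+1] == '\n':
--                     out.append('\r\n'); i += 2
--                 else:
--                     out.append('\n'); i += 1
--             seen_nonws_on_line = False
--             continue
--
--         # ochrana stringů / """ / blokových komentářů
--         if not in_ml and ch == '"' and block == 0 and (i == 0 or source[i-1] != '\\'):
--             in_str = not in_str; out.append(ch); i += 1; seen_nonws_on_line = True; continue
--         if not in_str and block == 0 and source.startswith('"""', i):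
--             in_ml = not in_ml; out.append('"""'); i += 3; seen_nonws_on_line = True; continue
--         if not in_str and not in_ml and nxt == '/*':
--             block += 1; out.append(nxt); i += 2; seen_nonws_on_line = True; continue
--         if not in_str and not in_ml and nxt == '*/' and block:
--             block -= 1; out.append(nxt); i += 2; seen_nonws_on_line = True; continue
--
--         # běžné WS 1:1 (není to prázdný řádek → komentář nevkládáme)
--         if ch in (' ', '\t'):
--             out.append(ch); i += 1; continue
--
--         # neterminální znak na řádku
--         seen_nonws_on_line = True
--         out.append(ch); i += 1
--
--     return ''.join(out)
-- ===== SOURCE B (Python) =====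
-- def inject_line_comments(source: str) -> str:
--     """Per-line rewrite: inject ' //c ' before the EOL of whitespace-only lines."""
--     out = []
--     n = len(source)
--     start = i = 0
--     while i < n:
--         c = source[i]
--         if c == '\n' or c == '\r':
--             line = source[start:i]
--             crlf = c == '\r' and i + 1 < n and source[i + 1] == '\n'
--             eol = '\r\n' if crlf else '\n'
--             if all(ch in ' \t' for ch in line):
--                 out.append(line + ' //c ' + eol)
--             else:
--                 out.append(line + eol)
--             i += 2 if crlf else 1
--             start = i
--         else:
--             i += 1
--     out.append(source[start:])
--     return ''.join(out)
-- ===== Notes on version B (the rewrite author's own statement) =====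
-- stated objective: simpler
-- what changed: Replaces A's character-by-character state machine (string/multiline/block-comment tracking whose state never affects the output) with a simple per-line scan: split at each EOL, emit the line with the comment marker injected before the EOL when the line is only spaces/tabs, normalizing a lone CR to LF and keeping CRLF.
import Mathlib
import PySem

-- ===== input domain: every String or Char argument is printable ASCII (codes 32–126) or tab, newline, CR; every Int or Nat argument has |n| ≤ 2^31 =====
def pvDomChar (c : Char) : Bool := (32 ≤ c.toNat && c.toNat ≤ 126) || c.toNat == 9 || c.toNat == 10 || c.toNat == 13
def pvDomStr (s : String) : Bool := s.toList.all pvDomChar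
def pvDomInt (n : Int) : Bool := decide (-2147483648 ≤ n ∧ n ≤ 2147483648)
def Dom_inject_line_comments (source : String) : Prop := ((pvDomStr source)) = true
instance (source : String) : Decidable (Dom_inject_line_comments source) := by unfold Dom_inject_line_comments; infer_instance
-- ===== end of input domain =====

-- B replaces A's character state machine (whose string/comment state never affects the
-- output) by a simpler per-line rewrite; objective: simpler, same cost.

-- ===== PORT A =====
-- Literal port of A's while-loop: one recursive step per loop iteration, same state
-- (prev = source[i-1], in_str, in_ml, block, seen_nonws_on_line), branches in A's order.
def injectA : List Char → Option Char → Bool → Bool → Nat → Bool → List Char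
  | [], _, _, _, _, _ => []
  | c :: rest, prev, instr, inml, block, seen =>
    if c = '\r' ∨ c = '\n' then
      if c = '\r' ∧ rest.head? = some '\n' then
        (if seen then ['\r', '\n'] else [' ', '/', '/', 'c', ' ', '\r', '\n'])
          ++ injectA (rest.drop 1) (some '\n') instr inml block false
      else
        (if seen then ['\n'] else [' ', '/', '/', 'c', ' ', '\n'])
          ++ injectA rest (some c) instr inml block false
    else if inml = false ∧ c = '"' ∧ block = 0 ∧ (prev = none ∨ prev ≠ some '\\') then
      '"' :: injectA rest (some '"') (!instr) inml block true
    else if instr = false ∧ block = 0 ∧ c = '"' ∧ rest.take 2 = ['"', '"'] then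
      '"' :: '"' :: '"' :: injectA (rest.drop 2) (some '"') instr (!inml) block true
    else if instr = false ∧ inml = false ∧ c = '/' ∧ rest.head? = some '*' then
      '/' :: '*' :: injectA (rest.drop 1) (some '*') instr inml (block + 1) true
    else if instr = false ∧ inml = false ∧ c = '*' ∧ rest.head? = some '/' ∧ block ≠ 0 then
      '*' :: '/' :: injectA (rest.drop 1) (some '/') instr inml (block - 1) true
    else if c = ' ' ∨ c = '\t' then
      c :: injectA rest (some c) instr inml block seen
    else
      c :: injectA rest (some c) instr inml block true
termination_by cs _ _ _ _ _ => cs.length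
decreasing_by all_goals simp

def inject_line_comments (source : String) : String :=
  String.ofList (injectA source.toList none false false 0 false)

-- ===== PORT B =====
-- Port of Source B: scan for the next EOL while buffering the current line (reversed),
-- emit the whole line at each EOL, injecting " //c " when it is only spaces/tabs.
def blankLineB (l : List Char) : Bool := l.all (fun c => c = ' ' || c = '\t')

def injectB : List Char → List Char → List Char
  | [], line => line.reverse
  | c :: rest, line =>
    if c = '\r' ∨ c = '\n' then
      (if blankLineB line.reverse then line.reverse ++ [' ', '/', '/', 'c', ' '] else line.reverse)
        ++ (if c = '\r' ∧ rest.head? = some '\n' then ['\r', '\n'] else ['\n'])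
        ++ injectB (if c = '\r' ∧ rest.head? = some '\n' then rest.drop 1 else rest) []
    else injectB rest (c :: line)
termination_by cs _ => cs.length
decreasing_by
  all_goals simp
  all_goals (split <;> simp)

def inject_line_comments_alt (source : String) : String :=
  String.ofList (injectB source.toList [])

-- ===== PRECONDITION & SPEC =====
def Spec_inject_line_comments (source : String) (out : String) : Prop := out = inject_line_comments_alt source
instance (source : String) (out : String) : Decidable (Spec_inject_line_comments source out) := by unfold Spec_inject_line_comments; infer_instance

-- ===== CLAIM (what is proved, stated in full; the proofs are below) =====
def Claim_equal_inject_line_comments : Prop := ∀ (source : String), Dom_inject_line_comments source → Spec_inject_line_comments source (inject_line_comments source)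

-- ===== LEMMAS AND PROOFS =====

theorem blankLineB_reverse (l : List Char) : blankLineB l.reverse = blankLineB l := by
  simp [blankLineB]

theorem blankLineB_nil : blankLineB [] = true := rfl

theorem blankLineB_cons (c : Char) (l : List Char) :
    blankLineB (c :: l) = ((c = ' ' || c = '\t') && blankLineB l) := by
  simp [blankLineB]

-- Invariant: B's buffered scan equals the already-emitted prefix plus A's machine,
-- whose in_str/in_ml/block/prev state never influences the output and whose
-- seen flag equals "the current line buffer is not all spaces/tabs".
theorem injectB_eq_injectA :
    ∀ (n : Nat) (cs : List Char), cs.length ≤ n →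
    ∀ (line : List Char) (prev : Option Char) (instr inml : Bool) (block : Nat),
      injectB cs line = line.reverse ++ injectA cs prev instr inml block (!blankLineB line) := by
  intro n
  induction n with
  | zero =>
    intro cs h line prev instr inml block
    have : cs = [] := List.length_eq_zero_iff.mp (Nat.le_zero.mp h)
    subst this
    simp [injectB, injectA]
  | succ n ih =>
    intro cs h line prev instr inml block
    match cs with
    | [] => simp [injectB, injectA]
    | c :: rest =>
      have hr : rest.length ≤ n := by simpa using h
      by_cases hE : c = '\r' ∨ c = '\n'
      · -- EOL step: both emit the current line (with injection iff blank) and recurse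
        rw [injectB, injectA, if_pos hE, if_pos hE]
        by_cases hc : c = '\r' ∧ rest.head? = some '\n'
        · rw [if_pos hc, if_pos hc, if_pos hc,
              ih (rest.drop 1) (by simp; omega) [] (some '\n') instr inml block]
          by_cases hb : blankLineB line = true <;>
            simp [blankLineB_reverse, hb, blankLineB_nil]
        · rw [if_neg hc, if_neg hc, if_neg hc,
              ih rest hr [] (some c) instr inml block]
          by_cases hb : blankLineB line = true <;>
            simp [blankLineB_reverse, hb, blankLineB_nil]
      · -- non-EOL: B buffers c, A emits it; the A-side state changes are absorbed
        -- because the invariant quantifies over prev/instr/inml/block.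
        rw [injectB, if_neg hE, injectA, if_neg hE]
        split_ifs with h1 h2 h3 h4 h5
        · -- '"' toggle
          obtain ⟨-, hcq, -, -⟩ := h1
          subst hcq
          rw [ih rest hr ('"' :: line) (some '"') (!instr) inml block]
          simp [blankLineB_cons]
        · -- '"""' : A consumes three chars, B buffers them one by one
          obtain ⟨hi, hb0, hcq, htk⟩ := h2
          match rest, htk with
          | q1 :: q2 :: rest3, htk =>
            have hq1 : q1 = '"' := by simpa using congrArg (·.head?) htk
            have hq2 : q2 = '"' := by
              have := congrArg (·.drop 1) htk; simpa using congrArg (·.head?) this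
            subst hq1 hq2 hcq
            rw [injectB, if_neg (by simp), injectB, if_neg (by simp)]
            rw [ih rest3 (by simp at h ⊢; omega) ('"' :: '"' :: '"' :: line)
                  (some '"') instr (!inml) block]
            simp [blankLineB_cons]
        · -- '/*'
          obtain ⟨hi, hm, hcq, hhd⟩ := h3
          match rest, hhd with
          | q1 :: rest2, hhd =>
            have hq1 : q1 = '*' := by simpa using hhd
            subst hq1 hcq
            rw [injectB, if_neg (by simp)]
            rw [ih rest2 (by simp at h ⊢; omega) ('*' :: '/' :: line)
                  (some '*') instr inml (block + 1)]
            simp [blankLineB_cons]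
        · -- '*/'
          obtain ⟨hi, hm, hcq, hhd, hbz⟩ := h4
          match rest, hhd with
          | q1 :: rest2, hhd =>
            have hq1 : q1 = '/' := by simpa using hhd
            subst hq1 hcq
            rw [injectB, if_neg (by simp)]
            rw [ih rest2 (by simp at h ⊢; omega) ('/' :: '*' :: line)
                  (some '/') instr inml (block - 1)]
            simp [blankLineB_cons]
        · -- plain space/tab keeps the flag
          rw [ih rest hr (c :: line) (some c) instr inml block]
          rcases h5 with h5 | h5 <;> simp [blankLineB_cons, h5]
        · -- ordinary non-whitespace character
          have hcs : ¬(c = ' ' ∨ c = '\t') := by assumption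
          have hs : c ≠ ' ' := fun hx => hcs (Or.inl hx)
          have ht : c ≠ '\t' := fun hx => hcs (Or.inr hx)
          rw [ih rest hr (c :: line) (some c) instr inml block]
          simp [blankLineB_cons, hs, ht]

-- ===== VERDICT (by name: the statement is the Claim_ definition above) =====
theorem inject_line_comments_spec : Claim_equal_inject_line_comments := by
  intro source _
  unfold Spec_inject_line_comments inject_line_comments inject_line_comments_alt
  have h := injectB_eq_injectA source.toList.length source.toList (le_refl _)
      [] none false false 0
  simp [blankLineB] at h
  rw [h]
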